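-- pv_equiv track=rewrite | github.com/Rahulnisanth/Complete-Python-Hub | NPTEL.py | transcript
-- ===== SOURCE A (Python) =====
-- def transcript(coursedetails, studentdetails, grades):
--     course_dict = dict(coursedetails)
--     student_dict = dict(studentdetails)
--
--     # Create a dictionary to store grades for each student
--     student_grades = {}
--     for roll, course, grade in grades:
--         if roll not in student_grades:
--             student_grades[roll] = []
--         student_grades[roll].append((course, course_dict[course], grade))
--
--     # Create the final transcript list
--     transcript_list = []
--     for roll, name in sorted(studentdetails, key=lambda x: x[0]):
--         if roll in student_grades:
--             sorted_grades = sorted(student_grades[roll], key=lambda x: x[0])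
--             transcript_list.append((roll, name, sorted_grades))
--
--     return transcript_list
-- ===== SOURCE B (Python) =====
-- def transcript(coursedetails, studentdetails, grades):
--     course_dict = dict(coursedetails)
--     result = []
--     for roll, name in sorted(studentdetails, key=lambda x: x[0]):
--         mine = sorted(
--             [(c, course_dict[c], g) for r, c, g in grades if r == roll],
--             key=lambda x: x[0],
--         )
--         if mine:
--             result.append((roll, name, mine))
--     return result
-- ===== Notes on version B (the rewrite author's own statement) =====
-- stated objective: simpler
-- what changed: B drops A's intermediate per-roll grouping dict entirely and instead, for each student in sorted roll order, filters the grades list directly and sorts that student's grades in place.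
import Mathlib
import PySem

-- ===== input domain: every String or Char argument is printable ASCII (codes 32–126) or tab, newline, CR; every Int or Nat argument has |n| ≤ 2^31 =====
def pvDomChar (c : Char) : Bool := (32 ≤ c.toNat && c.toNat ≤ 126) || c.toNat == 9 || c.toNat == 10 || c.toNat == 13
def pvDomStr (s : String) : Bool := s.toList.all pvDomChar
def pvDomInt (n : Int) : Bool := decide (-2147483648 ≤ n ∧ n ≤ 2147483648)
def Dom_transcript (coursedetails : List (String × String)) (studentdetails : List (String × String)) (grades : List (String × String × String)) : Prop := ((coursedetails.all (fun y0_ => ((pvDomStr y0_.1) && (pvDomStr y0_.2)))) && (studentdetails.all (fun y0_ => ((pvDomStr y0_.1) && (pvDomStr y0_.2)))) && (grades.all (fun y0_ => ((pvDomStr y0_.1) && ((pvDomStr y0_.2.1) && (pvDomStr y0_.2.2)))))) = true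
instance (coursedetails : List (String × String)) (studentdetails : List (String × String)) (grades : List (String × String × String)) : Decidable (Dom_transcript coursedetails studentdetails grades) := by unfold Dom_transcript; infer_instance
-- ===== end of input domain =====

-- B replaces A's intermediate grouping dict with a direct per-student filter of the grades
-- list (simpler decomposition, not faster); return values agree wherever A returns (Pre_).

-- ===== PORT A =====
-- Literal port of A. 'course_dict[course]' raises KeyError when the course is missing;
-- Pre_transcript excludes exactly those inputs, and inside Pre_ 'getD … ""' equals the lookup.
def transcript (coursedetails : List (String × String)) (studentdetails : List (String × String)) (grades : List (String × String × String)) : List (String × String × (List (String × String × String))) :=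
  let course_dict := PySem.Dict.ofList coursedetails
  let _student_dict := PySem.Dict.ofList studentdetails   -- computed and unused, as in A
  -- first loop: group grades per roll (membership test + append ≡ Dict.modify with default [])
  let student_grades : PySem.Dict String (List (String × String × String)) :=
    grades.foldl
      (fun d t => d.modify t.1 [] (· ++ [(t.2.1, course_dict.getD t.2.1 "", t.2.2)]))
      PySem.Dict.empty
  -- second loop: sorted students, emit those with grades
  (PySem.List.sorted studentdetails (fun x => x.1) false).foldl
    (fun acc p =>
      match student_grades.get? p.1 with
      | some gs => acc ++ [(p.1, p.2, PySem.List.sorted gs (fun x => x.1) false)]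
      | none => acc)
    []

-- ===== PORT B =====
def transcript_alt (coursedetails : List (String × String)) (studentdetails : List (String × String)) (grades : List (String × String × String)) : List (String × String × (List (String × String × String))) :=
  let course_dict := PySem.Dict.ofList coursedetails
  (PySem.List.sorted studentdetails (fun x => x.1) false).foldl
    (fun acc p =>
      let mine :=
        PySem.List.sorted
          ((grades.filter (fun t => t.1 == p.1)).map
            (fun t => (t.2.1, course_dict.getD t.2.1 "", t.2.2)))
          (fun x => x.1) false
      if mine = [] then acc else acc ++ [(p.1, p.2, mine)])
    []

-- ===== PRECONDITION & SPEC =====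
-- Pre_ excludes exactly the inputs on which A raises KeyError: a grade whose course is not a
-- key of coursedetails.  A returns no value there.
def Pre_transcript (coursedetails : List (String × String)) (studentdetails : List (String × String)) (grades : List (String × String × String)) : Prop :=
  grades.all (fun t => coursedetails.any (fun p => p.1 == t.2.1)) = true
instance (coursedetails : List (String × String)) (studentdetails : List (String × String)) (grades : List (String × String × String)) : Decidable (Pre_transcript coursedetails studentdetails grades) := by unfold Pre_transcript; infer_instance

def pvWitness_transcript : (List (String × String)) × (List (String × String)) × (List (String × String × String)) :=
  ([("c1", "Math"), ("c2", "Art")], [("r2", "Bob"), ("r1", "Ann")], [("r1", "c2", "A"), ("r1", "c1", "B"), ("r2", "c1", "C")])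

def Spec_transcript (coursedetails : List (String × String)) (studentdetails : List (String × String)) (grades : List (String × String × String)) (out : List (String × String × (List (String × String × String)))) : Prop := out = transcript_alt coursedetails studentdetails grades
instance (coursedetails : List (String × String)) (studentdetails : List (String × String)) (grades : List (String × String × String)) (out : List (String × String × (List (String × String × String)))) : Decidable (Spec_transcript coursedetails studentdetails grades out) := by unfold Spec_transcript; infer_instance

-- ===== CLAIM (what is proved, stated in full; the proofs are below) =====
def Claim_equal_transcript : Prop := ∀ (coursedetails : List (String × String)) (studentdetails : List (String × String)) (grades : List (String × String × String)), Dom_transcript coursedetails studentdetails grades → Pre_transcript coursedetails studentdetails grades → Spec_transcript coursedetails studentdetails grades (transcript coursedetails studentdetails grades)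

-- ===== LEMMAS AND PROOFS =====

-- The grouping dict's entry for a roll is exactly the filtered-and-mapped grades list.
theorem pv_getD_group (grades : List (String × String × String))
    (f : String × String × String → String × String × String) (r : String) :
    (grades.foldl (fun d t => d.modify t.1 [] (· ++ [f t]))
        (PySem.Dict.empty (κ := String))).getD r []
      = (grades.filter (fun t => t.1 == r)).map f := by
  have h : grades.foldl (fun d t => d.modify t.1 [] (· ++ [f t]))
        (PySem.Dict.empty (κ := String))
      = (grades.map (fun t => (t.1, f t))).foldl
          (fun d p => d.modify p.1 [] (· ++ [p.2])) PySem.Dict.empty := by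
    rw [List.foldl_map]
  rw [h, PySem.Dict.getD_foldl_modify_append]
  simp only [PySem.Dict.getD_empty, List.nil_append, List.filter_map, List.map_map]
  rfl

-- The dict contains a roll iff some grade has that roll.
theorem pv_contains_group (grades : List (String × String × String))
    (f : String × String × String → String × String × String) (r : String) :
    (grades.foldl (fun d t => d.modify t.1 [] (· ++ [f t]))
        (PySem.Dict.empty (κ := String))).contains r
      = grades.any (fun t => t.1 == r) := by
  have h : grades.foldl (fun d t => d.modify t.1 [] (· ++ [f t]))
        (PySem.Dict.empty (κ := String))
      = grades.foldl (fun d t => d.modify ((fun t : String × String × String => t.1) t) []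
          ((fun (_ : PySem.Dict String (List (String × String × String))) (t' : String × String × String) => (· ++ [f t'])) d t)) PySem.Dict.empty := rfl
  rw [h]
  have hk := PySem.Dict.keys_foldl_modify_key grades (fun t : String × String × String => t.1)
      (d := PySem.Dict.empty) (d0 := [])
      (f := fun (_ : PySem.Dict String (List (String × String × String))) (t' : String × String × String) => (· ++ [f t']))
  rw [PySem.Dict.contains_eq_decide_mem_keys, hk]
  simp only [PySem.Dict.keys_empty, PySem.Set.update, ← PySem.Set.ofList_eq_foldl]
  rw [Bool.eq_iff_iff]
  simp [PySem.Set.mem_ofList, List.any_eq_true]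

-- foldl with pointwise-equal step functions
theorem pv_foldl_fun_congr {α β : Type} (f g : α → β → α)
    (h : ∀ a b, f a b = g a b) (init : α) (l : List β) :
    l.foldl f init = l.foldl g init := by
  have hfg : f = g := funext fun a => funext (h a)
  rw [hfg]

-- ===== VERDICT (by name: the statement is the Claim_ definition above) =====
theorem transcript_spec : Claim_equal_transcript := by
  intro cd sd gr _ _
  unfold Spec_transcript transcript transcript_alt
  dsimp only
  apply pv_foldl_fun_congr
  intro acc p
  set f : String × String × String → String × String × String :=
    fun t => (t.2.1, (PySem.Dict.ofList cd).getD t.2.1 "", t.2.2) with hf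
  have hc := pv_contains_group gr f p.1
  have hg := pv_getD_group gr f p.1
  by_cases hmem : (gr.filter (fun t => t.1 == p.1)) = []
  · have hnone : (gr.foldl (fun d t => d.modify t.1 [] (· ++ [f t]))
        (PySem.Dict.empty (κ := String))).get? p.1 = none := by
      rw [PySem.Dict.get?_eq_none_iff_contains, hc]
      rw [List.any_eq_false]
      intro t ht hteq
      have : t ∈ gr.filter (fun t => t.1 == p.1) := List.mem_filter.mpr ⟨ht, hteq⟩
      simp [hmem] at this
    rw [hnone]
    have : ((gr.filter (fun t => t.1 == p.1)).map f) = [] := by rw [hmem]; rfl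
    simp [this, PySem.List.sorted]
  · have hcontains : (gr.foldl (fun d t => d.modify t.1 [] (· ++ [f t]))
        (PySem.Dict.empty (κ := String))).contains p.1 = true := by
      rw [hc]
      obtain ⟨t, ht⟩ := List.exists_mem_of_ne_nil _ hmem
      have := List.mem_filter.mp ht
      exact List.any_eq_true.mpr ⟨t, this.1, this.2⟩
    have hsome : (gr.foldl (fun d t => d.modify t.1 [] (· ++ [f t]))
        (PySem.Dict.empty (κ := String))).get? p.1
        = some ((gr.filter (fun t => t.1 == p.1)).map f) := by
      rw [← hg, PySem.Dict.getD_eq_get?_getD]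
      cases hq : (gr.foldl (fun d t => d.modify t.1 [] (· ++ [f t]))
          (PySem.Dict.empty (κ := String))).get? p.1 with
      | none => rw [PySem.Dict.get?_eq_none_iff_contains] at hq; simp [hq] at hcontains
      | some v => rfl
    rw [hsome]
    have hne : PySem.List.sorted ((gr.filter (fun t => t.1 == p.1)).map f)
        (fun x => x.1) false ≠ [] := by
      rw [Ne, PySem.List.sorted_eq_nil_iff]
      simp [hmem]
    simp [hne]
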